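-- pv_equiv track=rewrite | github.com/sdfsfwe/SGDEM-master | dataloader/file_io/dir_lister.py | include_dirs_by_name
-- ===== SOURCE A (Python) =====
-- def include_dirs_by_name(dir_list, names, ignore=(), ambiguous_names_to_ignore=()):   #用于根据目录名称来保留目录。它接受四个参数：dir_list表示目录路径的列表，
--     # names表示要在目录名称中匹配的字符串，ignore表示不应出现在目录名称中的字符串，ambiguous_names_to_ignore表示在比较名称时应忽略的字符串列表。
--     """ takes a list of directories and includes the directories which have all strings
--     of the ones specified by the list names
--
--     :param dir_list: list of directories
--     :param names: strings which have to be inside the directory name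
--     :param ignore: string that must not be inside the directory name
--     :param ambiguous_names_to_ignore: A list containing all strings that should not be taken into account when
--         comparing to names. For example, if an upper folder is called 'dataset_images' and one filter name
--         is also 'images' (e.g. for the color image), then this parameter will prevent all folder from being
--         returned
--     :return: a list of all folders containing all names, excluding those containing a string in ignore
--     """
--     shortened_dir_list = dir_list.copy()
--     if type(ambiguous_names_to_ignore) == str:
--         ambiguous_names_to_ignore = (ambiguous_names_to_ignore, )
--     for ambiguous_name in ambiguous_names_to_ignore:
--         shortened_dir_list = [x.replace(ambiguous_name, '') for x in shortened_dir_list]   #对于每个待忽略的字符串，使用字符串的replace方法将其从目录路径中移除，以便在后续的比较中忽略它。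
--     if type(names) == list: #根据names的类型进行筛选操作。
--         for name in names:
--             dir_list = [x for x, xs in zip(dir_list, shortened_dir_list) if name in xs]
--             shortened_dir_list = [xs for xs in shortened_dir_list if name in xs]
--     elif type(names) == str:
--         name = names
--         dir_list = [x for x, xs in zip(dir_list, shortened_dir_list) if name in xs]
--     for ignore_string in ignore:    #根据ignore参数中的字符串筛选出不应包含在结果中的目录路径，
--         dir_list = [x for x in dir_list if ignore_string not in x]
--     return dir_list
-- ===== SOURCE B (Python) =====
-- def include_dirs_by_name(dir_list, names, ignore=(), ambiguous_names_to_ignore=()):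
--     if type(ambiguous_names_to_ignore) == str:
--         ambiguous_names_to_ignore = (ambiguous_names_to_ignore,)
--     if type(names) == list:
--         name_filters = names
--     elif type(names) == str:
--         name_filters = [names]
--     else:
--         name_filters = []
--
--     def shorten(x):
--         for a in ambiguous_names_to_ignore:
--             x = x.replace(a, '')
--         return x
--
--     result = []
--     for x in dir_list:
--         xs = shorten(x)
--         if all(n in xs for n in name_filters) and not any(i in x for i in ignore):
--             result.append(x)
--     return result
-- ===== Notes on version B (the rewrite author's own statement) =====
-- stated objective: simpler
-- what changed: Replaces A's two parallel lists repeatedly re-filtered per name (zip/filter per name, then per ignore string) with a single pass over dir_list that shortens each path once and keeps it iff all names are in the shortened path and no ignore string is in the original.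
import Mathlib
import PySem

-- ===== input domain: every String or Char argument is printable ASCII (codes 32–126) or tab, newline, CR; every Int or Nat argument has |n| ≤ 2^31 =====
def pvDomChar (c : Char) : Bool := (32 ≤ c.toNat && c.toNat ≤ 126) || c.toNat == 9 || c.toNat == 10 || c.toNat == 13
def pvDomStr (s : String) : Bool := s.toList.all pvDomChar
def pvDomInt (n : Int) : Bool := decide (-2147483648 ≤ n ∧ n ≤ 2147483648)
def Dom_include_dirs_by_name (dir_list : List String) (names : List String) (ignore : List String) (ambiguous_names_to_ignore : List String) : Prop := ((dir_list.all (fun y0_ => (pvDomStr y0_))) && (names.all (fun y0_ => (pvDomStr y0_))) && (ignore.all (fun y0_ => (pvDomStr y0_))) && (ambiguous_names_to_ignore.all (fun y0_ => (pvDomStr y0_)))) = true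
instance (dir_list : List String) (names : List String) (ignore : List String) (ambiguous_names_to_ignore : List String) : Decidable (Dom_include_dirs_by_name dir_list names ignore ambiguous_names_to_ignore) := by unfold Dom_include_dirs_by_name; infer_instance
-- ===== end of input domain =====

-- B replaces A's two parallel lists re-filtered once per name with a single pass over
-- dir_list deciding membership directly (objective: simpler). No argument is mutated.

-- ===== PORT A =====
-- On the Lean types, names is always a list, so A's `type(names) == list` branch is taken
-- and the str/other branches are unreachable; likewise ambiguous_names_to_ignore is a list.
def include_dirs_by_name (dir_list : List String) (names : List String) (ignore : List String) (ambiguous_names_to_ignore : List String) : List String :=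
  -- shortened_dir_list = dir_list.copy(); for ambiguous_name in …: list-comprehension replace
  let shortened := ambiguous_names_to_ignore.foldl
    (fun sh a => sh.map (fun x => PySem.Str.replace x a "")) dir_list
  -- for name in names: filter the zipped pair of lists in parallel
  let p := names.foldl
    (fun (p : List String × List String) name =>
      (((p.1.zip p.2).filter (fun xy => PySem.Str.isIn name xy.2)).map (·.1),
       p.2.filter (fun xs => PySem.Str.isIn name xs)))
    (dir_list, shortened)
  -- for ignore_string in ignore: filter dir_list
  ignore.foldl (fun dl ig => dl.filter (fun x => !(PySem.Str.isIn ig x))) p.1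

-- ===== PORT B =====
def pvShorten (amb : List String) (x : String) : String :=
  amb.foldl (fun s a => PySem.Str.replace s a "") x

def include_dirs_by_name_alt (dir_list : List String) (names : List String) (ignore : List String) (ambiguous_names_to_ignore : List String) : List String :=
  dir_list.filter (fun x =>
    (names.all (fun n => PySem.Str.isIn n (pvShorten ambiguous_names_to_ignore x))) &&
    (ignore.all (fun i => !(PySem.Str.isIn i x))))

-- ===== PRECONDITION & SPEC =====
def Spec_include_dirs_by_name (dir_list : List String) (names : List String) (ignore : List String) (ambiguous_names_to_ignore : List String) (out : List String) : Prop := out = include_dirs_by_name_alt dir_list names ignore ambiguous_names_to_ignore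
instance (dir_list : List String) (names : List String) (ignore : List String) (ambiguous_names_to_ignore : List String) (out : List String) : Decidable (Spec_include_dirs_by_name dir_list names ignore ambiguous_names_to_ignore out) := by unfold Spec_include_dirs_by_name; infer_instance

-- ===== CLAIM (what is proved, stated in full; the proofs are below) =====
def Claim_equal_include_dirs_by_name : Prop := ∀ (dir_list : List String) (names : List String) (ignore : List String) (ambiguous_names_to_ignore : List String), Dom_include_dirs_by_name dir_list names ignore ambiguous_names_to_ignore → Spec_include_dirs_by_name dir_list names ignore ambiguous_names_to_ignore (include_dirs_by_name dir_list names ignore ambiguous_names_to_ignore)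

-- ===== LEMMAS AND PROOFS =====

-- The mapped-replace fold over ambiguous names is the per-element shorten.
theorem shortened_eq_map (amb : List String) (l : List String) :
    amb.foldl (fun sh a => sh.map (fun x => PySem.Str.replace x a "")) l
      = l.map (pvShorten amb) := by
  induction amb generalizing l with
  | nil => exact (List.map_id l).symm
  | cons a as ih =>
      simp only [List.foldl_cons, ih, List.map_map]
      rfl

-- Filtering the zip of a list with its map by the second component, then projecting,
-- is filtering the list by the composed predicate.
theorem zip_map_filter_fst (l : List String) (f : String → String) (q : String → Bool) :
    ((l.zip (l.map f)).filter (fun xy => q xy.2)).map (·.1)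
      = l.filter (fun x => q (f x)) := by
  induction l with
  | nil => rfl
  | cons x xs ih =>
      by_cases h : q (f x) <;> simp [h, ih]

-- The name loop keeps the invariant snd = map f fst and amounts to one combined filter.
theorem name_loop_eq (names : List String) (dl : List String) (f : String → String) :
    (names.foldl
      (fun (p : List String × List String) name =>
        (((p.1.zip p.2).filter (fun xy => PySem.Str.isIn name xy.2)).map (·.1),
         p.2.filter (fun xs => PySem.Str.isIn name xs)))
      (dl, dl.map f)).1
      = dl.filter (fun x => names.all (fun n => PySem.Str.isIn n (f x))) := by
  induction names generalizing dl with
  | nil => simp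
  | cons n ns ih =>
      simp only [List.foldl_cons, zip_map_filter_fst, List.filter_map, Function.comp_def]
      rw [ih, List.filter_filter]
      congr 1
      funext x
      simp [List.all_cons, Bool.and_comm]

-- The ignore loop is one combined filter.
theorem ignore_loop_eq (ignore : List String) (dl : List String) :
    ignore.foldl (fun dl ig => dl.filter (fun x => !(PySem.Str.isIn ig x))) dl
      = dl.filter (fun x => ignore.all (fun i => !(PySem.Str.isIn i x))) := by
  induction ignore generalizing dl with
  | nil => simp
  | cons i is ih =>
      simp only [List.foldl_cons, ih, List.filter_filter]
      congr 1
      funext x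
      simp [List.all_cons, Bool.and_comm]

-- ===== VERDICT (by name: the statement is the Claim_ definition above) =====
theorem include_dirs_by_name_spec : Claim_equal_include_dirs_by_name := by
  intro dl names ignore amb _
  unfold Spec_include_dirs_by_name
  simp only [include_dirs_by_name, include_dirs_by_name_alt]
  rw [shortened_eq_map, name_loop_eq, ignore_loop_eq, List.filter_filter]
  congr 1
  funext x
  simp [Bool.and_comm]
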